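-- pv_equiv track=rewrite | github.com/criskb/MKRShift_Nodes | lib/gcode_slicer.py | _orca_type
-- ===== SOURCE A (Python) =====
-- from typing import Any, Dict, Iterable, List, Optional, Sequence, Tuple
--
-- def _orca_type(obj: Any) -> str:
--     if not isinstance(obj, dict):
--         return "unknown"
--     type_hint = str(obj.get("type", obj.get("profile_type", obj.get("preset_type", ""))) or "").lower()
--     if "filament" in type_hint:
--         return "filament"
--     if "process" in type_hint:
--         return "process"
--     if "machine" in type_hint or "printer" in type_hint:
--         return "machine"
--     if any(key in obj for key in ("filament_diameter", "filament_dia", "filament_type")):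
--         return "filament"
--     if any(key in obj for key in ("infill_density", "layer_height", "perimeter_speed")):
--         return "process"
--     if any(key in obj for key in ("nozzle_diameter", "printable_area", "machine_start_gcode")):
--         return "machine"
--     return "unknown"
-- ===== SOURCE B (Python) =====
-- _KEY_LABEL = {"filament_diameter": "filament", "filament_dia": "filament", "filament_type": "filament",
--               "infill_density": "process", "layer_height": "process", "perimeter_speed": "process",
--               "nozzle_diameter": "machine", "printable_area": "machine", "machine_start_gcode": "machine"}
-- _HINT_KEYS = ("type", "profile_type", "preset_type")
--
-- def _orca_type(obj) -> str:
--     if not isinstance(obj, dict):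
--         return "unknown"
--     # single pass over the items: remember the hint values and which key family occurred
--     hints = {}
--     flags = {"filament": False, "process": False, "machine": False}
--     for k, v in obj.items():
--         if k in _HINT_KEYS:
--             hints.setdefault(k, v)
--         lab = _KEY_LABEL.get(k)
--         if lab is not None:
--             flags[lab] = True
--     raw = hints.get("type", hints.get("profile_type", hints.get("preset_type", "")))
--     type_hint = str(raw or "").lower()
--     if "filament" in type_hint:
--         return "filament"
--     if "process" in type_hint:
--         return "process"
--     if "machine" in type_hint or "printer" in type_hint:
--         return "machine"
--     for lab in ("filament", "process", "machine"):
--         if flags[lab]: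
--             return lab
--     return "unknown"
-- ===== Notes on version B (the rewrite author's own statement) =====
-- stated objective: alternative
-- what changed: Replaces A's three eager dict-get lookups plus three separate any(key in obj) membership scans with a single pass over obj.items() that accumulates the hint values and per-family presence flags, then classifies from the accumulator.
import Mathlib
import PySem

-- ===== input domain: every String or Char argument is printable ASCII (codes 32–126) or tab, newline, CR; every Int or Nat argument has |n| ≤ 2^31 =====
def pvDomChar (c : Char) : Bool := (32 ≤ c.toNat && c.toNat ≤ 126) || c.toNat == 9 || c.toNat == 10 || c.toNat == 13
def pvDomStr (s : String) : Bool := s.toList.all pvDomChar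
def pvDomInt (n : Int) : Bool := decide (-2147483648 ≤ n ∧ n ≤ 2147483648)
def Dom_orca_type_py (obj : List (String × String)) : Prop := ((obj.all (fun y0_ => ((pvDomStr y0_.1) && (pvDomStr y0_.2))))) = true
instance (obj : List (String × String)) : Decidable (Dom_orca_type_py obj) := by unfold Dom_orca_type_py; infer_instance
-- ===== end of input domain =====

-- B replaces A's eager get-chain plus three staged any(key in obj) membership scans
-- with ONE pass over the items that accumulates hint values and per-family flags (alternative decomposition).

-- ===== PORT A =====
def orca_type_py (obj : List (String × String)) : String :=
  let d := PySem.Dict.mk obj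
  let raw := d.getD "type" (d.getD "profile_type" (d.getD "preset_type" ""))
  -- str(x or '') on a string value: '' if x is empty, else x
  let type_hint := PySem.Str.lower (if raw == "" then "" else raw)
  if PySem.Str.isIn "filament" type_hint then "filament"
  else if PySem.Str.isIn "process" type_hint then "process"
  else if PySem.Str.isIn "machine" type_hint || PySem.Str.isIn "printer" type_hint then "machine"
  else if ["filament_diameter", "filament_dia", "filament_type"].any (fun k => d.contains k) then "filament"
  else if ["infill_density", "layer_height", "perimeter_speed"].any (fun k => d.contains k) then "process"
  else if ["nozzle_diameter", "printable_area", "machine_start_gcode"].any (fun k => d.contains k) then "machine"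
  else "unknown"

-- ===== PORT B =====
-- Source B's _KEY_LABEL dict, looked up with .get
def orcaKeyLabel (k : String) : Option String :=
  (PySem.Dict.mk [("filament_diameter", "filament"), ("filament_dia", "filament"), ("filament_type", "filament"),
                  ("infill_density", "process"), ("layer_height", "process"), ("perimeter_speed", "process"),
                  ("nozzle_diameter", "machine"), ("printable_area", "machine"), ("machine_start_gcode", "machine")]).get? k

-- the accumulator of Source B's single loop: hints["type"/"profile_type"/"preset_type"] and the three flags
-- (hints.setdefault keeps the FIRST value = this convention's assoc-list lookup)
def orcaScan : List (String × String) →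
    Option String × Option String × Option String × Bool × Bool × Bool →
    Option String × Option String × Option String × Bool × Bool × Bool
  | [], acc => acc
  | (k, v) :: rest, (t, p, q, f1, f2, f3) =>
      let t := if k == "type" && t.isNone then some v else t
      let p := if k == "profile_type" && p.isNone then some v else p
      let q := if k == "preset_type" && q.isNone then some v else q
      let f1 := f1 || (orcaKeyLabel k == some "filament")
      let f2 := f2 || (orcaKeyLabel k == some "process")
      let f3 := f3 || (orcaKeyLabel k == some "machine")
      orcaScan rest (t, p, q, f1, f2, f3)

def orca_type_py_alt (obj : List (String × String)) : String :=
  match orcaScan obj (none, none, none, false, false, false) with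
  | (t, p, q, f1, f2, f3) =>
    let raw := (t.or (p.or q)).getD ""
    let type_hint := PySem.Str.lower (if raw == "" then "" else raw)
    if PySem.Str.isIn "filament" type_hint then "filament"
    else if PySem.Str.isIn "process" type_hint then "process"
    else if PySem.Str.isIn "machine" type_hint || PySem.Str.isIn "printer" type_hint then "machine"
    else if f1 then "filament"
    else if f2 then "process"
    else if f3 then "machine"
    else "unknown"

-- ===== PRECONDITION & SPEC =====
def Spec_orca_type_py (obj : List (String × String)) (out : String) : Prop := out = orca_type_py_alt obj
instance (obj : List (String × String)) (out : String) : Decidable (Spec_orca_type_py obj out) := by unfold Spec_orca_type_py; infer_instance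

-- ===== CLAIM =====
def Claim_equal_orca_type_py : Prop := ∀ (obj : List (String × String)), Dom_orca_type_py obj → Spec_orca_type_py obj (orca_type_py obj)

-- ===== LEMMAS AND PROOFS =====
-- the accumulator after the scan, in terms of the assoc-list lookups A's dict performs
theorem orcaScan_spec (obj : List (String × String))
    (t p q : Option String) (f1 f2 f3 : Bool) :
    orcaScan obj (t, p, q, f1, f2, f3) =
      (t.or ((PySem.Dict.mk obj).get? "type"),
       p.or ((PySem.Dict.mk obj).get? "profile_type"),
       q.or ((PySem.Dict.mk obj).get? "preset_type"),
       f1 || obj.any (fun kv => orcaKeyLabel kv.1 == some "filament"),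
       f2 || obj.any (fun kv => orcaKeyLabel kv.1 == some "process"),
       f3 || obj.any (fun kv => orcaKeyLabel kv.1 == some "machine")) := by
  induction obj generalizing t p q f1 f2 f3 with
  | nil => simp [orcaScan, PySem.Dict.get?]
  | cons kv rest ih =>
      obtain ⟨k, v⟩ := kv
      simp only [orcaScan, ih, List.any_cons, PySem.Dict.get?_mk_cons]
      by_cases hk : k = "type" <;> by_cases hp : k = "profile_type" <;>
        by_cases hq : k = "preset_type" <;>
        simp_all [Option.or] <;> cases t <;> cases p <;> cases q <;>
        simp [Bool.or_assoc]

theorem keyLabel_fil (k : String) : (orcaKeyLabel k == some "filament") = (k == "filament_diameter" || (k == "filament_dia" || k == "filament_type")) := by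
  simp only [orcaKeyLabel, PySem.Dict.get?, List.find?]
  cases e1 : "filament_diameter" == k
  case true => rw [← eq_of_beq e1]; decide
  cases e2 : "filament_dia" == k
  case true => rw [← eq_of_beq e2]; decide
  cases e3 : "filament_type" == k
  case true => rw [← eq_of_beq e3]; decide
  cases e4 : "infill_density" == k
  case true => rw [← eq_of_beq e4]; decide
  cases e5 : "layer_height" == k
  case true => rw [← eq_of_beq e5]; decide
  cases e6 : "perimeter_speed" == k
  case true => rw [← eq_of_beq e6]; decide
  cases e7 : "nozzle_diameter" == k
  case true => rw [← eq_of_beq e7]; decide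
  cases e8 : "printable_area" == k
  case true => rw [← eq_of_beq e8]; decide
  cases e9 : "machine_start_gcode" == k
  case true => rw [← eq_of_beq e9]; decide
  simp only [BEq.comm (a := k), e1, e2, e3, e4, e5, e6, e7, e8, e9, Option.map_none]
  decide

theorem any_fil (obj : List (String × String)) :
    (obj.any (fun kv => orcaKeyLabel kv.1 == some "filament"))
    = (obj.any (fun p => p.1 == "filament_diameter") || (obj.any (fun p => p.1 == "filament_dia") || obj.any (fun p => p.1 == "filament_type"))) := by
  induction obj with
  | nil => rfl
  | cons kv rest ih =>
      simp only [List.any_cons]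
      rw [ih, keyLabel_fil]
      generalize (kv.1 == "filament_diameter") = a1
      generalize (kv.1 == "filament_dia") = a2
      generalize (kv.1 == "filament_type") = a3
      generalize (rest.any (fun p => p.1 == "filament_diameter")) = b1
      generalize (rest.any (fun p => p.1 == "filament_dia")) = b2
      generalize (rest.any (fun p => p.1 == "filament_type")) = b3
      cases a1 <;> cases a2 <;> cases a3 <;> cases b1 <;> cases b2 <;> cases b3 <;> rfl

theorem keyLabel_proc (k : String) : (orcaKeyLabel k == some "process") = (k == "infill_density" || (k == "layer_height" || k == "perimeter_speed")) := by
  simp only [orcaKeyLabel, PySem.Dict.get?, List.find?]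
  cases e1 : "filament_diameter" == k
  case true => rw [← eq_of_beq e1]; decide
  cases e2 : "filament_dia" == k
  case true => rw [← eq_of_beq e2]; decide
  cases e3 : "filament_type" == k
  case true => rw [← eq_of_beq e3]; decide
  cases e4 : "infill_density" == k
  case true => rw [← eq_of_beq e4]; decide
  cases e5 : "layer_height" == k
  case true => rw [← eq_of_beq e5]; decide
  cases e6 : "perimeter_speed" == k
  case true => rw [← eq_of_beq e6]; decide
  cases e7 : "nozzle_diameter" == k
  case true => rw [← eq_of_beq e7]; decide
  cases e8 : "printable_area" == k
  case true => rw [← eq_of_beq e8]; decide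
  cases e9 : "machine_start_gcode" == k
  case true => rw [← eq_of_beq e9]; decide
  simp only [BEq.comm (a := k), e1, e2, e3, e4, e5, e6, e7, e8, e9, Option.map_none]
  decide

theorem any_proc (obj : List (String × String)) :
    (obj.any (fun kv => orcaKeyLabel kv.1 == some "process"))
    = (obj.any (fun p => p.1 == "infill_density") || (obj.any (fun p => p.1 == "layer_height") || obj.any (fun p => p.1 == "perimeter_speed"))) := by
  induction obj with
  | nil => rfl
  | cons kv rest ih =>
      simp only [List.any_cons]
      rw [ih, keyLabel_proc]
      generalize (kv.1 == "infill_density") = a1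
      generalize (kv.1 == "layer_height") = a2
      generalize (kv.1 == "perimeter_speed") = a3
      generalize (rest.any (fun p => p.1 == "infill_density")) = b1
      generalize (rest.any (fun p => p.1 == "layer_height")) = b2
      generalize (rest.any (fun p => p.1 == "perimeter_speed")) = b3
      cases a1 <;> cases a2 <;> cases a3 <;> cases b1 <;> cases b2 <;> cases b3 <;> rfl

theorem keyLabel_mach (k : String) : (orcaKeyLabel k == some "machine") = (k == "nozzle_diameter" || (k == "printable_area" || k == "machine_start_gcode")) := by
  simp only [orcaKeyLabel, PySem.Dict.get?, List.find?]
  cases e1 : "filament_diameter" == k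
  case true => rw [← eq_of_beq e1]; decide
  cases e2 : "filament_dia" == k
  case true => rw [← eq_of_beq e2]; decide
  cases e3 : "filament_type" == k
  case true => rw [← eq_of_beq e3]; decide
  cases e4 : "infill_density" == k
  case true => rw [← eq_of_beq e4]; decide
  cases e5 : "layer_height" == k
  case true => rw [← eq_of_beq e5]; decide
  cases e6 : "perimeter_speed" == k
  case true => rw [← eq_of_beq e6]; decide
  cases e7 : "nozzle_diameter" == k
  case true => rw [← eq_of_beq e7]; decide
  cases e8 : "printable_area" == k
  case true => rw [← eq_of_beq e8]; decide
  cases e9 : "machine_start_gcode" == k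
  case true => rw [← eq_of_beq e9]; decide
  simp only [BEq.comm (a := k), e1, e2, e3, e4, e5, e6, e7, e8, e9, Option.map_none]
  decide

theorem any_mach (obj : List (String × String)) :
    (obj.any (fun kv => orcaKeyLabel kv.1 == some "machine"))
    = (obj.any (fun p => p.1 == "nozzle_diameter") || (obj.any (fun p => p.1 == "printable_area") || obj.any (fun p => p.1 == "machine_start_gcode"))) := by
  induction obj with
  | nil => rfl
  | cons kv rest ih =>
      simp only [List.any_cons]
      rw [ih, keyLabel_mach]
      generalize (kv.1 == "nozzle_diameter") = a1
      generalize (kv.1 == "printable_area") = a2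
      generalize (kv.1 == "machine_start_gcode") = a3
      generalize (rest.any (fun p => p.1 == "nozzle_diameter")) = b1
      generalize (rest.any (fun p => p.1 == "printable_area")) = b2
      generalize (rest.any (fun p => p.1 == "machine_start_gcode")) = b3
      cases a1 <;> cases a2 <;> cases a3 <;> cases b1 <;> cases b2 <;> cases b3 <;> rfl

-- ===== VERDICT =====
theorem orca_type_py_spec : Claim_equal_orca_type_py := by
  intro obj _
  unfold Spec_orca_type_py orca_type_py orca_type_py_alt
  rw [orcaScan_spec]
  simp only [PySem.Dict.contains_mk, List.any_cons, List.any_nil, Bool.or_false,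
             Bool.false_or, any_fil, any_proc, any_mach, Option.or]
  rcases h1 : (PySem.Dict.mk obj).get? "type" with _ | v1 <;>
    rcases h2 : (PySem.Dict.mk obj).get? "profile_type" with _ | v2 <;>
    rcases h3 : (PySem.Dict.mk obj).get? "preset_type" with _ | v3 <;>
    simp [PySem.Dict.getD, h1, h2, h3]
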